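-- pv_equiv track=rewrite | github.com/chrisvail/Project_Euler | Problem106.py | gen_disjoint_sets
-- ===== SOURCE A (Python) =====
-- def gen_disjoint_sets(numbers):
--     sets = [[[[0], [0], [0]]]]
--     # sets = [[[0, 0, 0]]]
--
--     for i in range(len(numbers)):
--         n = len(sets[i]) * 3
--         sets.append([])
--         for j in range(n):
--
--             a = [sets[i][j // 3][0][:], sets[i][j // 3][1][:], sets[i][j // 3][2][:] ]
--             # a = [sets[i][j // 3][0], sets[i][j // 3][1], sets[i][j // 3][2]]
--             if a[j % 3] == [0]:
--                 a[j % 3] = [numbers[i]]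
--             else:
--                 a[j % 3].append(numbers[i])
--
--             # a[j % 3] += numbers[i]
--
--             sets[i + 1].append(a)
--
--
--     return sets[len(numbers)]
-- ===== SOURCE B (Python) =====
-- def gen_disjoint_sets(numbers):
--     result = []
--     config = [[0], [0], [0]]
--
--     def recurse(i):
--         if i == len(numbers):
--             result.append([config[0][:], config[1][:], config[2][:]])
--             return
--         x = numbers[i]
--         for choice in range(3):
--             saved = config[choice]
--             config[choice] = [x] if saved == [0] else saved + [x]
--             recurse(i + 1)
--             config[choice] = saved
--
--     recurse(0)
--     return result
-- ===== Notes on version B (the rewrite author's own statement) =====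
-- stated objective: simpler
-- what changed: Replaces A's level-by-level BFS that stores every intermediate generation of configurations with a recursive DFS over the number index that backtracks a single working configuration, emitting each completed 3-subset configuration directly.
import Mathlib
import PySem

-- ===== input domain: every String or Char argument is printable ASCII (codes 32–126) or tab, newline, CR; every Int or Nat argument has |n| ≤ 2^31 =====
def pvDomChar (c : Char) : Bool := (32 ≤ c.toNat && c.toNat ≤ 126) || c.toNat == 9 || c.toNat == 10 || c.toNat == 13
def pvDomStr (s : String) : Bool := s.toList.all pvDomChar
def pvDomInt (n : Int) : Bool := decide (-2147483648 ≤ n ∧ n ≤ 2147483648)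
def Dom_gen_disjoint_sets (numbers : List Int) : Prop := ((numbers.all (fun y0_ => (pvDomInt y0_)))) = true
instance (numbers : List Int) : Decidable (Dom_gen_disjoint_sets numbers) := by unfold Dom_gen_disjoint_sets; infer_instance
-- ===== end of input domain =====

-- B replaces A's level-by-level BFS (storing every generation) with a backtracking
-- DFS over the number index: simpler, O(n) extra space besides the output.


-- ===== PORT A =====
-- inner `for j in range(n)` loop body: build config `a` from prev[j//3], mutate slot j%3
def pvAInner (x : Int) (prev : List (List (List Int))) (lvl : List (List (List Int))) (j : Nat) :
    List (List (List Int)) :=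
  let c := prev.getD (j / 3) []
  let a := [c.getD 0 [], c.getD 1 [], c.getD 2 []]
  let v := a.getD (j % 3) []
  let a' := a.set (j % 3) (if v = [0] then [x] else v ++ [x])
  lvl ++ [a']

def gen_disjoint_sets (numbers : List Int) : List (List (List Int)) :=
  let sets :=
    (List.range numbers.length).foldl
      (fun sets i =>
        let prev := sets.getD i []
        let n := prev.length * 3
        let newLevel := (List.range n).foldl (pvAInner (numbers.getD i 0) prev) []
        sets ++ [newLevel])
      [[[[0], [0], [0]]]]
  sets.getD numbers.length []

-- ===== PORT B =====
-- config[choice] update rule from Source B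
def pvPlace (s : List Int) (x : Int) : List Int := if s = [0] then [x] else s ++ [x]

-- recurse(i) from Source B: the three subsets of the working config are the arguments;
-- the choice-loop with backtracking becomes the three recursive calls appended in order
def pvDfs (xs : List Int) (s0 s1 s2 : List Int) : List (List (List Int)) :=
  match xs with
  | [] => [[s0, s1, s2]]
  | x :: rest =>
      pvDfs rest (pvPlace s0 x) s1 s2 ++ pvDfs rest s0 (pvPlace s1 x) s2 ++
        pvDfs rest s0 s1 (pvPlace s2 x)

def gen_disjoint_sets_alt (numbers : List Int) : List (List (List Int)) :=
  pvDfs numbers [0] [0] [0]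

-- ===== PRECONDITION & SPEC =====
def Spec_gen_disjoint_sets (numbers : List Int) (out : List (List (List Int))) : Prop := out = gen_disjoint_sets_alt numbers
instance (numbers : List Int) (out : List (List (List Int))) : Decidable (Spec_gen_disjoint_sets numbers out) := by unfold Spec_gen_disjoint_sets; infer_instance

-- ===== CLAIM (what is proved, stated in full; the proofs are below) =====
def Claim_equal_gen_disjoint_sets : Prop := ∀ (numbers : List Int), Dom_gen_disjoint_sets numbers → Spec_gen_disjoint_sets numbers (gen_disjoint_sets numbers)

-- ===== LEMMAS AND PROOFS =====

-- child k of a 3-element config, as A's inner body produces it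
def pvExpand (x : Int) (c : List (List Int)) : List (List (List Int)) :=
  [[pvPlace (c.getD 0 []) x, c.getD 1 [], c.getD 2 []],
   [c.getD 0 [], pvPlace (c.getD 1 []) x, c.getD 2 []],
   [c.getD 0 [], c.getD 1 [], pvPlace (c.getD 2 []) x]]

-- one BFS level as a flatMap
theorem pvInner_foldl (x : Int) (prev : List (List (List Int))) :
    (List.range (prev.length * 3)).foldl (pvAInner x prev) [] = prev.flatMap (pvExpand x) := by
  induction prev using List.reverseRecOn with
  | nil => simp
  | append_singleton L c ih =>
      have hlen : (L ++ [c]).length * 3 = L.length * 3 + 3 := by simp; ring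
      have hrange : List.range ((L ++ [c]).length * 3)
          = List.range (L.length * 3) ++ [L.length * 3, L.length * 3 + 1, L.length * 3 + 2] := by
        rw [hlen]
        rw [show L.length * 3 + 3 = ((L.length * 3 + 1) + 1) + 1 by ring]
        rw [List.range_succ, List.range_succ, List.range_succ]
        simp
      have hpre : ∀ (acc : List (List (List Int))),
          (List.range (L.length * 3)).foldl (pvAInner x (L ++ [c])) acc
            = (List.range (L.length * 3)).foldl (pvAInner x L) acc := by
        intro acc
        apply PySem.List.foldl_congr_mem
        intro b j hj
        have hj' : j < L.length * 3 := List.mem_range.mp hj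
        have hdiv : j / 3 < L.length := by omega
        unfold pvAInner
        rw [List.getD_append _ _ _ _ hdiv]
      rw [hrange, List.foldl_append, hpre]
      rw [ih]
      have hc0 : (L ++ [c]).getD (L.length * 3 / 3) [] = c := by
        have h : L.length * 3 / 3 = L.length := by omega
        simp [h]
      have hc1 : (L ++ [c]).getD ((L.length * 3 + 1) / 3) [] = c := by
        have h : (L.length * 3 + 1) / 3 = L.length := by omega
        simp [h]
      have hc2 : (L ++ [c]).getD ((L.length * 3 + 2) / 3) [] = c := by
        have h : (L.length * 3 + 2) / 3 = L.length := by omega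
        simp [h]
      have hm0 : L.length * 3 % 3 = 0 := by omega
      have hm1 : (L.length * 3 + 1) % 3 = 1 := by omega
      have hm2 : (L.length * 3 + 2) % 3 = 2 := by omega
      simp only [List.foldl_cons, List.foldl_nil, pvAInner, hc0, hc1, hc2, hm0, hm1, hm2]
      simp [List.flatMap_append, pvExpand, pvPlace, List.set, List.getD]

-- the BFS iteration over the remaining numbers, as a foldl over the numbers
def pvIter (xs : List Int) (L : List (List (List Int))) : List (List (List Int)) :=
  xs.foldl (fun acc x => acc.flatMap (pvExpand x)) L

theorem pvIter_append (xs : List Int) (L1 L2 : List (List (List Int))) :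
    pvIter xs (L1 ++ L2) = pvIter xs L1 ++ pvIter xs L2 := by
  induction xs generalizing L1 L2 with
  | nil => simp [pvIter]
  | cons x rest ih => simp [pvIter, List.foldl_cons, List.flatMap_append] at ih ⊢; exact ih _ _

-- BFS from a single 3-element config = DFS from its three subsets
theorem pvIter_dfs (xs : List Int) (a b c : List Int) :
    pvIter xs [[a, b, c]] = pvDfs xs a b c := by
  induction xs generalizing a b c with
  | nil => simp [pvIter, pvDfs]
  | cons x rest ih =>
      have : pvIter (x :: rest) [[a, b, c]] = pvIter rest (pvExpand x [a, b, c]) := by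
        simp [pvIter, List.foldl_cons]
      rw [this]
      have hexp : pvExpand x [a, b, c]
          = [[pvPlace a x, b, c]] ++ ([[a, pvPlace b x, c]] ++ [[a, b, pvPlace c x]]) := by
        simp [pvExpand, List.getD]
      rw [hexp, pvIter_append, pvIter_append, ih, ih, ih]
      simp [pvDfs]

-- the i-th BFS level, by recursion on i over numbers.getD
def pvLevel (numbers : List Int) : Nat → List (List (List Int))
  | 0 => [[[0], [0], [0]]]
  | i + 1 => (pvLevel numbers i).flatMap (pvExpand (numbers.getD i 0))

-- A's outer fold over range(len numbers) produces the list of all levels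
theorem pvA_levels (numbers : List Int) (i : Nat) :
    (List.range i).foldl
      (fun sets k =>
        let prev := sets.getD k []
        sets ++ [(List.range (prev.length * 3)).foldl (pvAInner (numbers.getD k 0) prev) []])
      [[[[0], [0], [0]]]]
      = (List.range (i + 1)).map (pvLevel numbers) := by
  induction i with
  | zero => simp [pvLevel]
  | succ i ih =>
      rw [List.range_succ, List.foldl_append, ih]
      simp only [List.foldl_cons, List.foldl_nil]
      have hget : ((List.range (i + 1)).map (pvLevel numbers)).getD i [] = pvLevel numbers i := by
        rw [List.getD_eq_getElem?_getD]
        simp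
      rw [hget, pvInner_foldl]
      rw [List.range_succ (n := i + 1), List.map_append]
      simp [pvLevel]

theorem pvLevel_iter (numbers : List Int) (i : Nat) (h : i ≤ numbers.length) :
    pvLevel numbers i = pvIter (numbers.take i) [[[0], [0], [0]]] := by
  induction i with
  | zero => simp [pvLevel, pvIter]
  | succ i ih =>
      have hi : i ≤ numbers.length := by omega
      have htake : numbers.take (i + 1) = numbers.take i ++ [numbers.getD i 0] := by
        have h : numbers[i]? = some numbers[i] := List.getElem?_eq_getElem (by omega)
        rw [List.getD_eq_getElem?_getD, h, List.take_add_one, h]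
        simp
      rw [pvLevel, ih hi, htake]
      simp [pvIter, List.foldl_append]

-- ===== VERDICT (by name: the statement is the Claim_ definition above) =====
theorem gen_disjoint_sets_spec : Claim_equal_gen_disjoint_sets := by
  intro numbers _
  unfold Spec_gen_disjoint_sets gen_disjoint_sets gen_disjoint_sets_alt
  simp only []
  rw [pvA_levels numbers numbers.length]
  have hget : ((List.range (numbers.length + 1)).map (pvLevel numbers)).getD numbers.length []
      = pvLevel numbers numbers.length := by
    rw [List.getD_eq_getElem?_getD]; simp
  rw [hget, pvLevel_iter numbers numbers.length le_rfl, List.take_length, pvIter_dfs]
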